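-- pv_equiv track=rewrite | github.com/matisandacz/ejercicios | mountain.py | mountain
-- ===== SOURCE A (Python) =====
-- def mountain(arr):
--
-- 	if(len(arr) <= 2):
-- 		return max(arr)
--
-- 	mid = len(arr) // 2
--
-- 	if(arr[mid] > arr[mid + 1] and arr[mid] > arr[mid - 1]):
-- 		return arr[mid]
--
-- 	if(arr[mid] > arr[mid-1]):
-- 		 return mountain(arr[mid+1:])
--
-- 	return mountain(arr[:mid])
-- ===== SOURCE B (Python) =====
-- def mountain(arr):
-- 	lo, hi = 0, len(arr)
-- 	while hi - lo > 2:
-- 		mid = lo + (hi - lo) // 2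
-- 		if arr[mid] > arr[mid + 1] and arr[mid] > arr[mid - 1]:
-- 			return arr[mid]
-- 		if arr[mid] > arr[mid - 1]:
-- 			lo = mid + 1
-- 		else:
-- 			hi = mid
-- 	return max(arr[lo:hi])
-- ===== Notes on version B (the rewrite author's own statement) =====
-- stated objective: alternative
-- what changed: Replaced A's recursion that copies a list slice at every step with an iterative two-index (lo, hi) binary search over the original list, so no sublists are materialised.
-- outside the precondition, e.g. on mountain([]): A raises ValueError, B raises ValueError
import Mathlib
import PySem

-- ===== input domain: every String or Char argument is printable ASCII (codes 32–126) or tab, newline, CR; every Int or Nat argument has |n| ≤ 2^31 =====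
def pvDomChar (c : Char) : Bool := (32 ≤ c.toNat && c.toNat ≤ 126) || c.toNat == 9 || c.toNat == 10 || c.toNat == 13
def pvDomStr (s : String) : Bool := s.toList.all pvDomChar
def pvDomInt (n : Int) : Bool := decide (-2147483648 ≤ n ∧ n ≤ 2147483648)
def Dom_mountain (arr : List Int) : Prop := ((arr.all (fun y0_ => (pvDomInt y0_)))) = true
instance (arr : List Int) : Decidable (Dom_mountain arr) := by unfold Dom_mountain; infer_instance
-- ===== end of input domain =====

-- B replaces A's slice-copying recursion by an iterative two-index binary search over the original list (alternative decomposition, no sublist copies); neither version mutates its argument.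

-- ===== PORT A =====
-- A's recursion, with a fuel counter (fuel = arr.length in `mountain`) standing in for Python's
-- unbounded recursion; the fuel-0 branch is unreachable since each call strictly shrinks the list.
def mountainGo : Nat → List Int → Int
  | 0, arr => (PySem.List.max? arr id).getD 0
  | f + 1, arr =>
    if arr.length ≤ 2 then (PySem.List.max? arr id).getD 0   -- max([]) raises in Python: excluded by Pre_
    else
      let mid : Int := PySem.Int.floordiv (arr.length : Int) 2
      if (PySem.List.pyGet? arr mid).getD 0 > (PySem.List.pyGet? arr (mid + 1)).getD 0 ∧
         (PySem.List.pyGet? arr mid).getD 0 > (PySem.List.pyGet? arr (mid - 1)).getD 0 then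
        (PySem.List.pyGet? arr mid).getD 0
      else if (PySem.List.pyGet? arr mid).getD 0 > (PySem.List.pyGet? arr (mid - 1)).getD 0 then
        mountainGo f (PySem.List.slice arr (some (mid + 1)) none)
      else
        mountainGo f (PySem.List.slice arr none (some mid))

def mountain (arr : List Int) : Int := mountainGo arr.length arr

-- ===== PORT B =====
-- B's while-loop over the index pair (lo, hi); fuel = initial window size bounds the iterations.
def mountainAltGo (arr : List Int) : Nat → Nat → Nat → Int
  | 0, lo, hi => (PySem.List.max? (PySem.List.slice arr (some (lo : Int)) (some (hi : Int))) id).getD 0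
  | f + 1, lo, hi =>
    if 2 < hi - lo then
      let mid := lo + (hi - lo) / 2
      if (PySem.List.pyGet? arr (mid : Int)).getD 0 > (PySem.List.pyGet? arr ((mid : Int) + 1)).getD 0 ∧
         (PySem.List.pyGet? arr (mid : Int)).getD 0 > (PySem.List.pyGet? arr ((mid : Int) - 1)).getD 0 then
        (PySem.List.pyGet? arr (mid : Int)).getD 0
      else if (PySem.List.pyGet? arr (mid : Int)).getD 0 > (PySem.List.pyGet? arr ((mid : Int) - 1)).getD 0 then
        mountainAltGo arr f (mid + 1) hi
      else
        mountainAltGo arr f lo mid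
    else (PySem.List.max? (PySem.List.slice arr (some (lo : Int)) (some (hi : Int))) id).getD 0

def mountain_alt (arr : List Int) : Int := mountainAltGo arr arr.length 0 arr.length

-- ===== PRECONDITION & SPEC =====
-- Pre_ excludes only the empty list, on which Python A (and B) raise ValueError from max([]).
def Pre_mountain (arr : List Int) : Prop := arr ≠ []
instance (arr : List Int) : Decidable (Pre_mountain arr) := by unfold Pre_mountain; infer_instance
def pvWitness_mountain : List Int := [1, 3, 2]

def Spec_mountain (arr : List Int) (out : Int) : Prop := out = mountain_alt arr
instance (arr : List Int) (out : Int) : Decidable (Spec_mountain arr out) := by unfold Spec_mountain; infer_instance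

-- ===== CLAIM (what is proved, stated in full; the proofs are below) =====
def Claim_equal_mountain : Prop := ∀ (arr : List Int), Dom_mountain arr → Pre_mountain arr → Spec_mountain arr (mountain arr)

-- ===== LEMMAS AND PROOFS =====

-- The loop on window [lo, hi) computes A's recursion on the copied sublist arr[lo:hi] (same fuel on both sides).
theorem mountainAltGo_eq (arr : List Int) (f lo hi : Nat) (hhi : hi ≤ arr.length) (hf : hi - lo ≤ f) :
    mountainAltGo arr f lo hi = mountainGo f ((arr.drop lo).take (hi - lo)) := by
  induction f generalizing lo hi with
  | zero =>
    rw [mountainAltGo, mountainGo]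
    rw [show ((lo : Int)) = ((lo : Nat) : Int) from rfl, PySem.List.slice_natCast]
  | succ f ih =>
    have hwlen : ((arr.drop lo).take (hi - lo)).length = hi - lo := by
      simp only [List.length_take, List.length_drop]
      omega
    rw [mountainAltGo, mountainGo]
    by_cases h : 2 < hi - lo
    case neg =>
      rw [if_neg h, if_pos (by omega : ((arr.drop lo).take (hi - lo)).length ≤ 2)]
      rw [show ((lo : Int)) = ((lo : Nat) : Int) from rfl, PySem.List.slice_natCast]
    case pos =>
      have h1 : 1 ≤ (hi - lo) / 2 := by omega
      rw [if_pos h, if_neg (by omega : ¬ ((arr.drop lo).take (hi - lo)).length ≤ 2)]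
      have hmidA : PySem.Int.floordiv ((((arr.drop lo).take (hi - lo)).length : Nat) : Int) 2
          = (((hi - lo) / 2 : Nat) : Int) := by
        rw [hwlen]; exact_mod_cast PySem.Int.floordiv_natCast (hi - lo) 2
      rw [hwlen] at hmidA
      simp only [hwlen, hmidA]
      -- normalise the ±1 integer indices to casts of Nat indices
      have cA1 : (((hi - lo) / 2 : Nat) : Int) + 1 = (((hi - lo) / 2 + 1 : Nat) : Int) := by push_cast; ring
      have cA2 : (((hi - lo) / 2 : Nat) : Int) - 1 = (((hi - lo) / 2 - 1 : Nat) : Int) := by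
        push_cast [Nat.cast_sub h1]; ring
      have cB1 : ((lo + (hi - lo) / 2 : Nat) : Int) + 1 = ((lo + (hi - lo) / 2 + 1 : Nat) : Int) := by
        push_cast; ring
      have cB2 : ((lo + (hi - lo) / 2 : Nat) : Int) - 1 = ((lo + (hi - lo) / 2 - 1 : Nat) : Int) := by
        have : 1 ≤ lo + (hi - lo) / 2 := by omega
        push_cast [Nat.cast_sub this]; ring
      rw [cA1, cA2, cB1, cB2]
      simp only [PySem.List.pyGet?_natCast]
      -- window lookups are lookups in arr at shifted indices
      have g : ∀ i : Nat, i < hi - lo → ((arr.drop lo).take (hi - lo))[i]? = arr[lo + i]? := by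
        intro i hi'
        rw [List.getElem?_take_of_lt hi', List.getElem?_drop]
      rw [g ((hi - lo) / 2) (by omega), g ((hi - lo) / 2 + 1) (by omega),
          g ((hi - lo) / 2 - 1) (by omega)]
      rw [show lo + ((hi - lo) / 2 + 1) = lo + (hi - lo) / 2 + 1 from by omega,
          show lo + ((hi - lo) / 2 - 1) = lo + (hi - lo) / 2 - 1 from by omega]
      split_ifs
      · rfl
      · -- right half
        rw [PySem.List.slice_from_natCast]
        rw [ih (lo + (hi - lo) / 2 + 1) hi hhi (by omega)]
        congr 1
        rw [List.drop_take, List.drop_drop]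
        congr 1
        omega
      · -- left half
        rw [PySem.List.slice_to_natCast]
        rw [ih lo (lo + (hi - lo) / 2) (by omega) (by omega)]
        rw [List.take_take]
        have hmin : lo + (hi - lo) / 2 - lo = min ((hi - lo) / 2) (hi - lo) := by omega
        rw [hmin]

-- ===== VERDICT (by name: the statement is the Claim_ definition above) =====
theorem mountain_spec : Claim_equal_mountain := by
  intro arr _ _
  unfold Spec_mountain mountain_alt mountain
  rw [mountainAltGo_eq arr arr.length 0 arr.length le_rfl (by omega)]
  simp
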